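-- pv_equiv track=rewrite | github.com/itspatxi/bicing-barcelona-ml | src/transform/ics_to_festivos_csv.py | unfold_ics_lines
-- ===== SOURCE A (Python) =====
-- def unfold_ics_lines(text: str) -> list[str]:
--     """
--     iCalendar permite "folding": una línea que continúa empieza por espacio o tab.
--     Aquí unimos esas continuaciones a la línea anterior.
--     """
--     lines = text.replace("\r\n", "\n").replace("\r", "\n").split("\n")
--     out: list[str] = []
--     for ln in lines:
--         if not ln:
--             continue
--         if ln.startswith((" ", "\t")) and out:
--             out[-1] += ln[1:]
--         else:
--             out.append(ln)
--     return out
-- ===== SOURCE B (Python) =====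
-- def unfold_ics_lines(text: str) -> list[str]:
--     lines = [ln for ln in text.replace("\r\n", "\n").replace("\r", "\n").split("\n") if ln]
--
--     def merge(ls):
--         if not ls:
--             return []
--         head = ls[0]
--         i = 1
--         while i < len(ls) and ls[i].startswith((" ", "\t")):
--             head += ls[i][1:]
--             i += 1
--         return [head] + merge(ls[i:])
--
--     return merge(lines)
-- ===== Notes on version B (the rewrite author's own statement) =====
-- stated objective: alternative
-- what changed: Replaces the single-pass accumulator that repeatedly rewrites the last output element (out[-1] += ...) with a filter-first recursion that builds each unfolded line exactly once by consuming its whole run of continuation lines before emitting it.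
import Mathlib
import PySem

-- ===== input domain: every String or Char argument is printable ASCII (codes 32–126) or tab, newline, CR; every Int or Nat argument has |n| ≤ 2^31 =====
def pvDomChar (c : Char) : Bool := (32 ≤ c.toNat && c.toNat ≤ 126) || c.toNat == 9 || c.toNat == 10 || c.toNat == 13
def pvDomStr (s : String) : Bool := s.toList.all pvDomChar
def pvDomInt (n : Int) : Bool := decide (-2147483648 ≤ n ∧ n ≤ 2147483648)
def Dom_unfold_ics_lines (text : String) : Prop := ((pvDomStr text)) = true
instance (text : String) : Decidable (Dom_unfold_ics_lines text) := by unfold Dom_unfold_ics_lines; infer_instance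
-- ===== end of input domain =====

-- B replaces A's mutate-last accumulator loop by a recursion that emits each unfolded line once; return values proved equal on all inputs.

-- ===== PORT A =====
-- A's loop: skip empty lines; a line starting with space/tab is appended to out[-1] (minus its first char) when out is nonempty; otherwise appended as a new line.
def pvALoop (out : List String) : List String → List String
  | [] => out
  | ln :: rest =>
    if ln == "" then pvALoop out rest
    else if (PySem.Str.startswith ln " " || PySem.Str.startswith ln "\t") && !out.isEmpty then
      pvALoop (out.dropLast ++ [out.getLast! ++ PySem.Str.slice ln (some 1) none]) rest
    else
      pvALoop (out ++ [ln]) rest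

def unfold_ics_lines (text : String) : List String :=
  pvALoop [] ((PySem.Str.split? (PySem.Str.replace (PySem.Str.replace text "\r\n" "\n") "\r" "\n") "\n").getD [])

-- ===== PORT B =====
-- inner while: absorb the run of continuation lines into head, return (head, remaining lines)
def pvBGroup (head : String) : List String → String × List String
  | [] => (head, [])
  | ln :: rest =>
    if PySem.Str.startswith ln " " || PySem.Str.startswith ln "\t" then
      pvBGroup (head ++ PySem.Str.slice ln (some 1) none) rest
    else (head, ln :: rest)

theorem pvBGroup_snd_length (head : String) (ls : List String) :
    (pvBGroup head ls).2.length ≤ ls.length := by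
  induction ls generalizing head with
  | nil => simp [pvBGroup]
  | cons ln rest ih =>
    simp only [pvBGroup]
    split
    · exact Nat.le_trans (ih _) (Nat.le_succ _)
    · simp

def pvBMerge : List String → List String
  | [] => []
  | head :: rest =>
    let g := pvBGroup head rest
    g.1 :: pvBMerge g.2
termination_by ls => ls.length
decreasing_by
  exact Nat.lt_succ_of_le (pvBGroup_snd_length head rest)

def unfold_ics_lines_alt (text : String) : List String :=
  pvBMerge (((PySem.Str.split? (PySem.Str.replace (PySem.Str.replace text "\r\n" "\n") "\r" "\n") "\n").getD []).filter (fun ln => !(ln == "")))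

-- ===== PRECONDITION & SPEC =====
def Spec_unfold_ics_lines (text : String) (out : List String) : Prop := out = unfold_ics_lines_alt text
instance (text : String) (out : List String) : Decidable (Spec_unfold_ics_lines text out) := by unfold Spec_unfold_ics_lines; infer_instance

-- ===== CLAIM (what is proved, stated in full; the proofs are below) =====
def Claim_equal_unfold_ics_lines : Prop := ∀ (text : String), Dom_unfold_ics_lines text → Spec_unfold_ics_lines text (unfold_ics_lines text)

-- ===== LEMMAS AND PROOFS =====

-- A's loop ignores empty lines, so it may be run on the pre-filtered list.
theorem pvALoop_filter (out : List String) (ls : List String) :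
    pvALoop out ls = pvALoop out (ls.filter (fun ln => !(ln == ""))) := by
  induction ls generalizing out with
  | nil => rfl
  | cons ln rest ih =>
    by_cases h : ln = ""
    · subst h; simpa [pvALoop] using ih out
    · have hb : (ln == "") = false := by simpa using h
      simp only [List.filter_cons, hb, Bool.not_false, if_true]
      simp only [pvALoop, hb, Bool.false_eq_true, if_false]
      split
      · exact ih _
      · exact ih _

theorem pvGetLast!_concat (acc : List String) (x : String) : (acc ++ [x]).getLast! = x := by
  induction acc with
  | nil => rfl
  | cons a as ih => cases as with
    | nil => rfl
    | cons b bs => simp [List.getLast!]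

theorem pvMain (ls : List String) (hne : ∀ ln ∈ ls, ¬ ln = "") (acc : List String) (head : String) :
    pvALoop (acc ++ [head]) ls = acc ++ (pvBGroup head ls).1 :: pvBMerge (pvBGroup head ls).2 := by
  induction ls generalizing acc head with
  | nil => simp [pvALoop, pvBGroup, pvBMerge]
  | cons ln rest ih =>
    have hb : (ln == "") = false := by simpa using hne ln (List.mem_cons_self ..)
    have hrest : ∀ l ∈ rest, ¬ l = "" := fun l hl => hne l (List.mem_cons_of_mem _ hl)
    have hout : ((acc ++ [head]).isEmpty) = false := by simp
    by_cases hc : (PySem.Str.startswith ln " " || PySem.Str.startswith ln "\t") = true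
    · simp only [pvALoop, pvBGroup, hb, hc, hout, Bool.false_eq_true, if_false, Bool.not_false,
        Bool.and_true, if_true, List.dropLast_concat, pvGetLast!_concat]
      exact ih hrest acc (head ++ PySem.Str.slice ln (some 1) none)
    · have hc' : (PySem.Str.startswith ln " " || PySem.Str.startswith ln "\t") = false := by
        simpa using hc
      simp only [pvALoop, pvBGroup, hb, hc', hout, Bool.false_eq_true, if_false, Bool.false_and,
        Bool.not_false]
      rw [show acc ++ [head] ++ [ln] = (acc ++ [head]) ++ [ln] by simp]
      rw [ih hrest (acc ++ [head]) ln]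
      conv_rhs => rw [pvBMerge]
      simp

-- ===== VERDICT (by name: the statement is the Claim_ definition above) =====
theorem unfold_ics_lines_spec : Claim_equal_unfold_ics_lines := by
  intro text _
  unfold Spec_unfold_ics_lines unfold_ics_lines unfold_ics_lines_alt
  rw [pvALoop_filter]
  generalize ((PySem.Str.split? (PySem.Str.replace (PySem.Str.replace text "\r\n" "\n") "\r" "\n") "\n").getD []) = xs
  have hne : ∀ ln ∈ xs.filter (fun ln => !(ln == "")), ¬ ln = "" := by
    intro ln hln
    have := (List.mem_filter.mp hln).2
    simpa using this
  cases h : xs.filter (fun ln => !(ln == "")) with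
  | nil => simp [pvALoop, pvBMerge]
  | cons hd tl =>
    rw [h] at hne
    have hb : (hd == "") = false := by simpa using hne hd (List.mem_cons_self ..)
    simp only [pvALoop, hb, Bool.false_eq_true, if_false, List.isEmpty_nil, Bool.not_true,
      Bool.and_false, List.nil_append]
    rw [show [hd] = ([] : List String) ++ [hd] from rfl,
      pvMain tl (fun l hl => hne l (List.mem_cons_of_mem _ hl)) [] hd]
    conv_rhs => rw [pvBMerge]
    simp
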